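-- pv_equiv track=rewrite | github.com/ncolaian/MutualInformationTheory | bin/MIT-run.py | create_position_identity_matrix
-- ===== SOURCE A (Python) =====
-- from typing import Dict
--
-- def create_position_identity_matrix(sequences: list) -> Dict[int, list]:
--     """Build a position identity matrix from aligned sequences.
--
--     Parameters
--     ----------
--     sequences : list[str]
--         Aligned sequences (all sequences should have the same length).
--
--     Returns
--     -------
--     Dict[int, list]
--         Mapping from 1-based position to a list of characters observed at
--         that position across all sequences.
--     """
--     identity_dict = {}
--     for seq in sequences:
--         for pos, char in enumerate(seq, start=1):
--             if pos in identity_dict: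
--                 identity_dict[pos].append(char)
--             else:
--                 identity_dict[pos] = [char]
--
--     return identity_dict
-- ===== SOURCE B (Python) =====
-- def create_position_identity_matrix(sequences: list):
--     """Column-major transpose: one pass per position instead of per sequence."""
--     if not sequences:
--         return {}
--     maxlen = max(map(len, sequences))
--     return {p: [seq[p - 1] for seq in sequences if len(seq) >= p]
--             for p in range(1, maxlen + 1)}
-- ===== Notes on version B (the rewrite author's own statement) =====
-- stated objective: alternative
-- what changed: Inverted the loop nesting: instead of scanning each sequence and appending characters into a growing dict with an exists/append branch, B computes the maximum length and builds each position's column directly by one comprehension over the sequences (a column-major transpose), with no membership test.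
import Mathlib
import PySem

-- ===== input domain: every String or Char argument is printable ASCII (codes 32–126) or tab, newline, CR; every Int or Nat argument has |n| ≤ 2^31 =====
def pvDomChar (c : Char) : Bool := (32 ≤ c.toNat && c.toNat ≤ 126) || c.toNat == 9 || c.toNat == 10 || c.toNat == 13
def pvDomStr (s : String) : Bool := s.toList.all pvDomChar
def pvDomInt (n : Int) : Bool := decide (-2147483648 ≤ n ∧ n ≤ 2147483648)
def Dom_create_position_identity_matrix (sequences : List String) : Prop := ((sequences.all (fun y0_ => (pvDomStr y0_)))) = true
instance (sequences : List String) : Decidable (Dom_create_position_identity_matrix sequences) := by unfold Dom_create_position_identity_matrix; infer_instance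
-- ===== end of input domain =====

-- B inverts A's loop nesting (column-major transpose over positions instead of
-- row-major dict building); same return value, no side effects involved.

-- ===== PORT A =====
-- one dict step: 'if pos in identity_dict: append else: identity_dict[pos] = [char]'
def pvStep (d : PySem.Dict Int (List String)) (pc : Int × Char) : PySem.Dict Int (List String) :=
  if d.contains pc.1 then d.insert pc.1 (d.getD pc.1 [] ++ [String.singleton pc.2])
  else d.insert pc.1 [String.singleton pc.2]

-- inner loop: 'for pos, char in enumerate(seq, start=1): …'
def pvInner (d : PySem.Dict Int (List String)) (seq : String) : PySem.Dict Int (List String) :=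
  (PySem.List.enumerate seq.toList 1).foldl pvStep d

def create_position_identity_matrix (sequences : List String) : List (Int × List String) :=
  (sequences.foldl pvInner PySem.Dict.empty).items

-- ===== PORT B =====
-- '[seq[p-1] for seq in sequences if len(seq) >= p]' with p = i+1
def pvColB (sequences : List String) (i : Nat) : List String :=
  sequences.filterMap (fun s => if i < s.toList.length then (s.toList[i]?).map String.singleton else none)

def create_position_identity_matrix_alt (sequences : List String) : List (Int × List String) :=
  if sequences.isEmpty then []
  else
    let maxlen := (sequences.map (fun s => s.toList.length)).foldl max 0
    (List.range maxlen).map (fun i => (((i : Nat) : Int) + 1, pvColB sequences i))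

-- ===== PRECONDITION & SPEC =====
def Spec_create_position_identity_matrix (sequences : List String) (out : List (Int × List String)) : Prop := out = create_position_identity_matrix_alt sequences
instance (sequences : List String) (out : List (Int × List String)) : Decidable (Spec_create_position_identity_matrix sequences out) := by unfold Spec_create_position_identity_matrix; infer_instance

-- ===== CLAIM (what is proved, stated in full; the proofs are below) =====
def Claim_equal_create_position_identity_matrix : Prop := ∀ (sequences : List String), Dom_create_position_identity_matrix sequences → Spec_create_position_identity_matrix sequences (create_position_identity_matrix sequences)

-- ===== LEMMAS AND PROOFS =====

-- keys 1..k as an Int list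
def pvR (k : Nat) : List Int := (List.range k).map (fun (i : Nat) => (i : Int) + 1)

-- the characters sequence s contributes at 1-based position q
def pvPiece (q : Int) (cs : List Char) : List String :=
  ((if 1 ≤ q then cs[(q - 1).toNat]? else none).map String.singleton).toList

theorem pvStep_eq_modify :
    pvStep = fun d pc => PySem.Dict.modify d pc.1 [] (fun v => v ++ [String.singleton pc.2]) := by
  funext d pc
  unfold pvStep PySem.Dict.modify
  by_cases h : d.contains pc.1
  · simp [h]
  · rw [if_neg h, PySem.Dict.getD_of_not_contains d [] (by simpa using h)]
    rfl

theorem pv_inner_getD (cs : List Char) : ∀ (t : Int) (d : PySem.Dict Int (List String)) (q : Int),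
    ((PySem.List.enumerate cs t).foldl pvStep d).getD q []
      = d.getD q [] ++ ((if t ≤ q then cs[(q - t).toNat]? else none).map String.singleton).toList := by
  induction cs with
  | nil => intro t d q; simp [PySem.List.enumerate_nil]
  | cons c cs ih =>
    intro t d q
    rw [PySem.List.enumerate_cons, List.foldl_cons, ih]
    have hstep : (pvStep d (t, c)).getD q []
        = if q = t then d.getD t [] ++ [String.singleton c] else d.getD q [] := by
      rw [pvStep_eq_modify]
      simpa using PySem.Dict.getD_modify d t q [] (fun v => v ++ [String.singleton c])
    by_cases hq : q = t
    · subst hq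
      have h0 : (q - q).toNat = 0 := by omega
      simp [hstep, show ¬ (q + 1 ≤ q) by omega]
    · rw [hstep, if_neg hq]
      by_cases hle : t ≤ q
      · have h1 : t + 1 ≤ q := by omega
        have h2 : (q - t).toNat = (q - (t + 1)).toNat + 1 := by omega
        simp [hle, h1, h2]
      · have h1 : ¬ (t + 1 ≤ q) := by omega
        simp [hle, h1]

theorem pv_outer_getD (ss : List String) : ∀ (d : PySem.Dict Int (List String)) (q : Int),
    (ss.foldl pvInner d).getD q []
      = d.getD q [] ++ ss.flatMap (fun s => pvPiece q s.toList) := by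
  induction ss with
  | nil => intro d q; simp
  | cons s ss ih =>
    intro d q
    rw [List.foldl_cons, ih, List.flatMap_cons, ← List.append_assoc]
    congr 1
    unfold pvInner pvPiece
    exact pv_inner_getD s.toList 1 d q

theorem pv_pyRange_eq_pvR (n : Nat) : PySem.List.pyRange 1 (1 + (n : Int)) 1 = pvR n := by
  rw [PySem.List.pyRange_one]
  unfold pvR
  have h1 : ((1 : Int) + n - 1).toNat = n := by omega
  rw [h1]
  exact List.map_congr_left (fun k _ => by omega)

theorem pv_mem_pvR (x : Int) (j : Nat) : x ∈ pvR j ↔ 1 ≤ x ∧ x ≤ j := by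
  unfold pvR
  simp only [List.mem_map, List.mem_range]
  constructor
  · rintro ⟨i, hi, rfl⟩; omega
  · intro h; exact ⟨(x - 1).toNat, by omega, by omega⟩

theorem pv_update_pvR (m : Nat) : ∀ (k : Nat), PySem.Set.update (pvR k) (pvR m) = pvR (max k m) := by
  induction m with
  | zero => intro k; simp [pvR, PySem.Set.update_nil]
  | succ m ih =>
    intro k
    have hsplit : pvR (m + 1) = pvR m ++ [((m : Nat) : Int) + 1] := by
      unfold pvR; rw [List.range_succ, List.map_append]; rfl
    rw [hsplit, PySem.Set.update_append, ih, PySem.Set.update_cons, PySem.Set.update_nil]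
    by_cases hm : ((m : Nat) : Int) + 1 ∈ pvR (max k m)
    · rw [PySem.Set.add_of_mem hm]
      have := (pv_mem_pvR _ _).mp hm
      congr 1; omega
    · rw [PySem.Set.add_of_not_mem hm]
      have hnot : ¬ ((1 : Int) ≤ ((m : Nat) : Int) + 1 ∧ ((m : Nat) : Int) + 1 ≤ (max k m : Nat)) := by
        intro h; exact hm ((pv_mem_pvR _ _).mpr h)
      have hk : max k m = m := by omega
      have hk2 : max k (m + 1) = m + 1 := by omega
      rw [hk, hk2, ← hsplit]

theorem pv_keys_inner (d : PySem.Dict Int (List String)) (s : String) :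
    (pvInner d s).keys = PySem.Set.update d.keys (pvR s.toList.length) := by
  unfold pvInner
  rw [pvStep_eq_modify]
  refine (PySem.Dict.keys_foldl_modify_key (PySem.List.enumerate s.toList 1) Prod.fst []
      (fun _ pc v => v ++ [String.singleton pc.2]) d).trans ?_
  rw [show (PySem.List.enumerate s.toList 1).map Prod.fst
        = PySem.List.pyRange 1 (1 + (s.toList.length : Int)) 1 from by
      simpa using PySem.List.map_fst_enumerate s.toList 1]
  rw [pv_pyRange_eq_pvR]

theorem pv_keys_outer (ss : List String) : ∀ (k : Nat) (d : PySem.Dict Int (List String)),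
    d.keys = pvR k →
    (ss.foldl pvInner d).keys = pvR (ss.foldl (fun m s => max m s.toList.length) k) := by
  induction ss with
  | nil => intro k d h; simpa using h
  | cons s ss ih =>
    intro k d h
    rw [List.foldl_cons, List.foldl_cons]
    exact ih (max k s.toList.length) (pvInner d s)
      (by rw [pv_keys_inner, h, pv_update_pvR])

theorem pv_col_eq (ss : List String) (i : Nat) :
    ss.flatMap (fun s => pvPiece (((i : Nat) : Int) + 1) s.toList) = pvColB ss i := by
  induction ss with
  | nil => rfl
  | cons s ss ih =>
    rw [List.flatMap_cons]
    unfold pvColB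
    rw [List.filterMap_cons]
    have hp : pvPiece (((i : Nat) : Int) + 1) s.toList
        = ((s.toList[i]?).map String.singleton).toList := by
      unfold pvPiece
      rw [if_pos (by omega : (1:Int) ≤ ((i : Nat) : Int) + 1)]
      have h1 : (((i : Nat) : Int) + 1 - 1).toNat = i := by omega
      rw [h1]
    by_cases h : i < s.toList.length
    · rw [if_pos h]
      have hc : s.toList[i]? = some s.toList[i] := List.getElem?_eq_getElem h
      simp only [hp, hc, Option.map_some, Option.toList_some, List.singleton_append, ih]
      rfl
    · rw [if_neg h]
      have hc : s.toList[i]? = none := List.getElem?_eq_none (by omega)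
      simp only [hp, hc, Option.map_none, Option.toList_none, List.nil_append]
      exact ih

theorem pv_nodup_pvR (k : Nat) : (pvR k).Nodup :=
  List.Nodup.map (fun a b h => by omega) (List.nodup_range)

-- ===== VERDICT (by name: the statement is the Claim_ definition above) =====
theorem create_position_identity_matrix_spec : Claim_equal_create_position_identity_matrix := by
  intro ss _
  unfold Spec_create_position_identity_matrix create_position_identity_matrix create_position_identity_matrix_alt
  cases ss with
  | nil => rfl
  | cons s0 rest =>
    rw [if_neg (by simp)]
    set ss := s0 :: rest with hss
    have hM : ((ss.map (fun s => s.toList.length)).foldl max 0)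
        = ss.foldl (fun m s => max m s.toList.length) 0 := by
      rw [List.foldl_map]
    rw [hM]
    set M := ss.foldl (fun m s => max m s.toList.length) 0 with hMdef
    show (ss.foldl pvInner PySem.Dict.empty).items
        = (List.range M).map (fun i => (((i : Nat) : Int) + 1, pvColB ss i))
    have hkeys : (ss.foldl pvInner PySem.Dict.empty).keys = pvR M :=
      pv_keys_outer ss 0 PySem.Dict.empty (by simp [pvR, PySem.Dict.keys_empty])
    rw [PySem.Dict.items_eq_map_keys _ (hkeys ▸ pv_nodup_pvR M) []]
    rw [hkeys]
    unfold pvR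
    rw [List.map_map]
    refine List.map_congr_left (fun i _ => ?_)
    simp only [Function.comp_apply]
    congr 1
    rw [pv_outer_getD ss PySem.Dict.empty (((i : Nat) : Int) + 1), PySem.Dict.getD_empty,
      List.nil_append]
    exact pv_col_eq ss i
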